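-- pv_equiv track=rewrite | github.com/natedudley/pyDerby | logger.py | calcPlacement
-- ===== SOURCE A (Python) =====
-- def calcPlacement(times):
--     res = [1] * len(times)
--     for i in range(len(times) - 1):
--         for j in range(i + 1, len(times)):
--             if times[i] > times[j]:
--                 res[i] = res[i] + 1
--             elif times[i] < times[j]:
--                 res[j] = res[j] + 1
--     return res
-- ===== SOURCE B (Python) =====
-- def calcPlacement(times):
--     rank = {}
--     for idx, t in enumerate(sorted(times)):
--         if t not in rank:
--             rank[t] = idx + 1
--     return [rank[t] for t in times]
-- ===== Notes on version B (the rewrite author's own statement) =====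
-- stated objective: faster
-- what changed: Replaces the all-pairs comparison loop by sorting once and reading each element's competition rank as 1 + the first index of its value in the sorted list (memoised in a dict), O(n log n) instead of O(n^2).
import Mathlib
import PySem

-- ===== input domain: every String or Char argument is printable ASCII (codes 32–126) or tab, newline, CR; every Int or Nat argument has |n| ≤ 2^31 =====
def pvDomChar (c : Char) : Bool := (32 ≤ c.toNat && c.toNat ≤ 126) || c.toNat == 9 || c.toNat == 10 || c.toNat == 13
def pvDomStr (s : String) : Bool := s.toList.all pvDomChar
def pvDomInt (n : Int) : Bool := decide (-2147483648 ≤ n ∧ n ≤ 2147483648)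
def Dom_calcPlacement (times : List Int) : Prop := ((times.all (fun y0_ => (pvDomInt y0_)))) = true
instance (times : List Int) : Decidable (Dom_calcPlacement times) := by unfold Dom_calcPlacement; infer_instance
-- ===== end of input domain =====

-- B replaces A's all-pairs O(n^2) comparison loop by sorting once and ranking each element
-- as 1 + the first index of its value in the sorted list (memoised in a dict): objective = faster.

-- ===== PORT A =====
def calcPlacement (times : List Int) : List Int :=
  let res := PySem.List.pyRepeat [(1 : Int)] (PySem.List.len times)
  (PySem.List.pyRange 0 (PySem.List.len times - 1) 1).foldl (fun res i =>
    (PySem.List.pyRange (i + 1) (PySem.List.len times) 1).foldl (fun res j =>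
      if PySem.List.pyGetD times i 0 > PySem.List.pyGetD times j 0 then
        PySem.List.pySetD res i (PySem.List.pyGetD res i 0 + 1)
      else if PySem.List.pyGetD times i 0 < PySem.List.pyGetD times j 0 then
        PySem.List.pySetD res j (PySem.List.pyGetD res j 0 + 1)
      else res) res) res

-- ===== PORT B =====
def calcPlacement_alt (times : List Int) : List Int :=
  let s := PySem.List.sorted times (fun x => x) false
  let rank := (PySem.List.enumerate s 0).foldl
    (fun (d : PySem.Dict Int Int) p => if d.contains p.2 then d else d.insert p.2 (p.1 + 1))
    PySem.Dict.empty
  times.map (fun t => (rank.get? t).getD 0)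

-- ===== PRECONDITION & SPEC =====
def Spec_calcPlacement (times : List Int) (out : List Int) : Prop := out = calcPlacement_alt times
instance (times : List Int) (out : List Int) : Decidable (Spec_calcPlacement times out) := by unfold Spec_calcPlacement; infer_instance

-- ===== CLAIM (what is proved, stated in full; the proofs are below) =====
def Claim_equal_calcPlacement : Prop := ∀ (times : List Int), Dom_calcPlacement times → Spec_calcPlacement times (calcPlacement times)

-- ===== LEMMAS AND PROOFS =====

-- the rank every element receives: 1 + number of strictly smaller entries
def pvRank (ts : List Int) (t : Int) : Int := 1 + (ts.countP (fun x => decide (x < t)) : Int)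

-- ---- A side ----

def pvStepA (ts : List Int) (res : List Int) (p : Int × Int) : List Int :=
  if PySem.List.pyGetD ts p.1 0 > PySem.List.pyGetD ts p.2 0 then
    PySem.List.pySetD res p.1 (PySem.List.pyGetD res p.1 0 + 1)
  else if PySem.List.pyGetD ts p.1 0 < PySem.List.pyGetD ts p.2 0 then
    PySem.List.pySetD res p.2 (PySem.List.pyGetD res p.2 0 + 1)
  else res

def pvInc (ts : List Int) (k : Int) (p : Int × Int) : Bool :=
  (p.1 == k && PySem.List.pyGetD ts p.2 0 < PySem.List.pyGetD ts p.1 0) ||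
  (p.2 == k && PySem.List.pyGetD ts p.1 0 < PySem.List.pyGetD ts p.2 0)

def pvPairs (n : Int) : List (Int × Int) :=
  (PySem.List.pyRange 0 (n - 1) 1).flatMap (fun i => (PySem.List.pyRange (i + 1) n 1).map (fun j => (i, j)))

lemma pvA_eq_fold (ts : List Int) :
    calcPlacement ts = (pvPairs (ts.length : Int)).foldl (pvStepA ts) (List.replicate ts.length (1 : Int)) := by
  simp only [calcPlacement, pvPairs, List.foldl_flatMap, List.foldl_map, pvStepA,
    PySem.List.pyRepeat_singleton, PySem.List.len_eq, Int.toNat_natCast]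

lemma pvGetD_set (xs : List Int) (i m : Int) (v : Int) (h0 : 0 ≤ i) (h1 : i < (xs.length : Int)) (h2 : 0 ≤ m) :
    PySem.List.pyGetD (PySem.List.pySetD xs i v) m 0 = if m = i then v else PySem.List.pyGetD xs m 0 := by
  obtain ⟨ni, rfl⟩ := Int.eq_ofNat_of_zero_le h0
  obtain ⟨nm, rfl⟩ := Int.eq_ofNat_of_zero_le h2
  rw [PySem.List.pyGetD_pySetD_natCast xs ni nm v 0 (by omega)]
  simp

lemma pvStepA_length (ts res : List Int) (p : Int × Int) : (pvStepA ts res p).length = res.length := by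
  unfold pvStepA
  split_ifs <;> simp [PySem.List.length_pySetD]

lemma pvStepA_getD (ts res : List Int) (p : Int × Int)
    (hp : 0 ≤ p.1 ∧ p.1 < (res.length : Int) ∧ 0 ≤ p.2 ∧ p.2 < (res.length : Int))
    (k : Int) (hk : 0 ≤ k) :
    PySem.List.pyGetD (pvStepA ts res p) k 0 =
      PySem.List.pyGetD res k 0 + (if pvInc ts k p then 1 else 0) := by
  obtain ⟨h1, h2, h3, h4⟩ := hp
  by_cases hgt : PySem.List.pyGetD ts p.1 0 > PySem.List.pyGetD ts p.2 0
  · have hstep : pvStepA ts res p = PySem.List.pySetD res p.1 (PySem.List.pyGetD res p.1 0 + 1) := by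
      simp [pvStepA, hgt]
    have hinc : pvInc ts k p = (p.1 == k) := by
      unfold pvInc
      have e1 : decide (PySem.List.pyGetD ts p.2 0 < PySem.List.pyGetD ts p.1 0) = true := by
        simp; omega
      have e2 : decide (PySem.List.pyGetD ts p.1 0 < PySem.List.pyGetD ts p.2 0) = false := by
        simp; omega
      simp [e1, e2]
    rw [hstep, pvGetD_set res p.1 k _ h1 h2 hk, hinc]
    by_cases hki : k = p.1
    · simp [hki]
    · have e : (p.1 == k) = false := by simp; omega
      simp [hki, e]
  · by_cases hlt : PySem.List.pyGetD ts p.1 0 < PySem.List.pyGetD ts p.2 0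
    · have hstep : pvStepA ts res p = PySem.List.pySetD res p.2 (PySem.List.pyGetD res p.2 0 + 1) := by
        simp [pvStepA, hgt, hlt]
      have hinc : pvInc ts k p = (p.2 == k) := by
        unfold pvInc
        have e1 : decide (PySem.List.pyGetD ts p.2 0 < PySem.List.pyGetD ts p.1 0) = false := by
          simp; omega
        have e2 : decide (PySem.List.pyGetD ts p.1 0 < PySem.List.pyGetD ts p.2 0) = true := by
          simp; omega
        simp [e1, e2]
      rw [hstep, pvGetD_set res p.2 k _ h3 h4 hk, hinc]
      by_cases hkj : k = p.2
      · simp [hkj]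
      · have e : (p.2 == k) = false := by simp; omega
        simp [hkj, e]
    · have hstep : pvStepA ts res p = res := by simp [pvStepA, hgt, hlt]
      have hinc : pvInc ts k p = false := by
        unfold pvInc
        have e1 : decide (PySem.List.pyGetD ts p.2 0 < PySem.List.pyGetD ts p.1 0) = false := by
          simp; omega
        have e2 : decide (PySem.List.pyGetD ts p.1 0 < PySem.List.pyGetD ts p.2 0) = false := by
          simp; omega
        simp [e1, e2]
      rw [hstep, hinc]
      simp

lemma pvFold_getD (ts : List Int) (L : List (Int × Int)) (res : List Int)
    (hL : ∀ p ∈ L, 0 ≤ p.1 ∧ p.1 < (res.length : Int) ∧ 0 ≤ p.2 ∧ p.2 < (res.length : Int)) :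
    (L.foldl (pvStepA ts) res).length = res.length ∧
    ∀ k : Int, 0 ≤ k →
      PySem.List.pyGetD (L.foldl (pvStepA ts) res) k 0 =
        PySem.List.pyGetD res k 0 + (L.countP (pvInc ts k) : Int) := by
  induction L generalizing res with
  | nil => simp
  | cons p L ih =>
    have hp := hL p (List.mem_cons_self ..)
    have hlen := pvStepA_length ts res p
    have hL' : ∀ q ∈ L, 0 ≤ q.1 ∧ q.1 < ((pvStepA ts res p).length : Int) ∧
        0 ≤ q.2 ∧ q.2 < ((pvStepA ts res p).length : Int) := by
      intro q hq; rw [hlen]; exact hL q (List.mem_cons_of_mem _ hq)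
    obtain ⟨ihl, ihg⟩ := ih (pvStepA ts res p) hL'
    refine ⟨by simp [List.foldl_cons, ihl, hlen], ?_⟩
    intro k hk
    rw [List.foldl_cons, ihg k hk, pvStepA_getD ts res p hp k hk, List.countP_cons]
    by_cases h : pvInc ts k p <;> simp [h] <;> ring

lemma pvPairs_mem (n : Int) (p : Int × Int) (h : p ∈ pvPairs n) :
    0 ≤ p.1 ∧ p.1 < p.2 ∧ p.2 < n := by
  simp only [pvPairs, List.mem_flatMap, List.mem_map, PySem.List.mem_pyRange_one] at h
  obtain ⟨i, ⟨hi0, hi1⟩, j, ⟨hj0, hj1⟩, rfl⟩ := h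
  exact ⟨hi0, by omega, hj1⟩

lemma pvSumIte {α : Type} (p : α → Bool) (l : List α) :
    (l.map (fun x => if p x then 1 else 0)).sum = l.countP p := by
  induction l with
  | nil => simp
  | cons x l ih => by_cases h : p x <;> simp [h, ih, List.countP_cons] <;> omega

lemma pvMap_take (ts : List Int) (k : Int) (h0 : 0 ≤ k) (h1 : k ≤ (ts.length : Int)) :
    (PySem.List.pyRange 0 k 1).map (fun j => PySem.List.pyGetD ts j 0) = ts.take k.toNat := by
  have hsplit := PySem.List.pyRange_one_append 0 k (PySem.List.len ts) h0 (by simpa using h1)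
  have htot := PySem.List.map_pyGetD_pyRange_zero ts (0 : Int)
  have hdrop := PySem.List.map_pyGetD_pyRange ts (0 : Int) h0
  rw [hsplit, List.map_append, hdrop] at htot
  have := congrArg (List.take k.toNat) htot
  rw [List.take_append_of_le_length (by simp [PySem.List.length_pyRange_one])] at this
  rw [List.take_of_length_le (by simp [PySem.List.length_pyRange_one])] at this
  exact this

lemma pvCount (ts : List Int) (k : Int) (h0 : 0 ≤ k) (h1 : k < (ts.length : Int)) :
    (pvPairs (ts.length : Int)).countP (pvInc ts k) =
      ts.countP (fun x => decide (x < PySem.List.pyGetD ts k 0)) := by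
  set n : Int := (ts.length : Int) with hn
  set t0 : Int := PySem.List.pyGetD ts k 0 with ht0
  have hc : ∀ i : Int,
      (pvPairs n).countP (pvInc ts k) =
      ((PySem.List.pyRange 0 (n - 1) 1).map
        (fun i => (PySem.List.pyRange (i + 1) n 1).countP (fun j => pvInc ts k (i, j)))).sum := by
    intro _
    rw [pvPairs, List.countP_flatMap]
    congr 1
    apply List.map_congr_left
    intro i _
    simp only [Function.comp_apply, List.countP_map, Function.comp_def]
  rw [hc 0]
  -- value of the inner count for i = k
  have hck : (PySem.List.pyRange (k + 1) n 1).countP (fun j => pvInc ts k (k, j)) =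
      (ts.drop (k + 1).toNat).countP (fun x => decide (x < t0)) := by
    have hstep : (PySem.List.pyRange (k + 1) n 1).countP (fun j => pvInc ts k (k, j)) =
        (PySem.List.pyRange (k + 1) n 1).countP (fun j => decide (PySem.List.pyGetD ts j 0 < t0)) := by
      apply List.countP_congr
      intro j hj
      rw [PySem.List.mem_pyRange_one] at hj
      have hjk : (j == k) = false := by simp; omega
      simp [pvInc, hjk, ← ht0]
    rw [hstep, ← PySem.List.map_pyGetD_pyRange ts (0 : Int) (by omega), List.countP_map]
    rfl
  -- value of the inner count for i < k
  have hlt : ∀ i : Int, 0 ≤ i → i < k →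
      (PySem.List.pyRange (i + 1) n 1).countP (fun j => pvInc ts k (i, j)) =
      (if decide (PySem.List.pyGetD ts i 0 < t0) then 1 else 0) := by
    intro i hi0 hik
    have hik' : (i == k) = false := by simp; omega
    by_cases hv : PySem.List.pyGetD ts i 0 < t0
    · have hstep : (PySem.List.pyRange (i + 1) n 1).countP (fun j => pvInc ts k (i, j)) =
          (PySem.List.pyRange (i + 1) n 1).countP (fun j => j == k) := by
        apply List.countP_congr
        intro j _
        simp [pvInc, hik', hv]
        intro hjk
        rw [hjk, ← ht0]
        exact hv
      rw [hstep]
      have hkmem : k ∈ PySem.List.pyRange (i + 1) n 1 := by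
        rw [PySem.List.mem_pyRange_one]; omega
      have := List.count_eq_one_of_mem (PySem.List.nodup_pyRange_one (i + 1) n) hkmem
      simpa [List.count, hv] using this
    · have hstep : (PySem.List.pyRange (i + 1) n 1).countP (fun j => pvInc ts k (i, j)) = 0 := by
        rw [List.countP_eq_zero]
        intro j _
        simp [pvInc, hik']
        intro hjk
        rw [hjk, ← ht0]
        omega
      rw [hstep]
      simp [hv]
  -- value of the inner count for i > k
  have hgt : ∀ i : Int, k < i →
      (PySem.List.pyRange (i + 1) n 1).countP (fun j => pvInc ts k (i, j)) = 0 := by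
    intro i hki
    rw [List.countP_eq_zero]
    intro j hj
    rw [PySem.List.mem_pyRange_one] at hj
    have h1 : (i == k) = false := by simp; omega
    have h2 : (j == k) = false := by simp; omega
    simp [pvInc, h1, h2]
  -- split the outer range at k
  rw [PySem.List.pyRange_one_append 0 k (n - 1) h0 (by omega), List.map_append, List.sum_append]
  -- first part: indices below k
  have hpart1 : ((PySem.List.pyRange 0 k 1).map
      (fun i => (PySem.List.pyRange (i + 1) n 1).countP (fun j => pvInc ts k (i, j)))).sum =
      (ts.take k.toNat).countP (fun x => decide (x < t0)) := by
    have hmc : (PySem.List.pyRange 0 k 1).map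
        (fun i => (PySem.List.pyRange (i + 1) n 1).countP (fun j => pvInc ts k (i, j))) =
        (PySem.List.pyRange 0 k 1).map
        (fun i => if decide (PySem.List.pyGetD ts i 0 < t0) then 1 else 0) := by
      apply List.map_congr_left
      intro i hi
      rw [PySem.List.mem_pyRange_one] at hi
      exact hlt i hi.1 hi.2
    rw [hmc, pvSumIte (fun i => decide (PySem.List.pyGetD ts i 0 < t0)) _,
      ← pvMap_take ts k h0 (by omega), List.countP_map]
    rfl
  -- second part: index k itself, then indices above k
  have hpart2 : ((PySem.List.pyRange k (n - 1) 1).map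
      (fun i => (PySem.List.pyRange (i + 1) n 1).countP (fun j => pvInc ts k (i, j)))).sum =
      (ts.drop (k + 1).toNat).countP (fun x => decide (x < t0)) := by
    by_cases hkn : k < n - 1
    · rw [PySem.List.pyRange_one_cons hkn, List.map_cons, List.sum_cons, hck]
      have hz : ((PySem.List.pyRange (k + 1) (n - 1) 1).map
          (fun i => (PySem.List.pyRange (i + 1) n 1).countP (fun j => pvInc ts k (i, j)))).sum = 0 := by
        apply List.sum_eq_zero
        intro x hx
        rw [List.mem_map] at hx
        obtain ⟨i, hi, rfl⟩ := hx
        rw [PySem.List.mem_pyRange_one] at hi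
        exact hgt i (by omega)
      rw [hz]
      omega
    · have hke : k = n - 1 := by omega
      have hr1 : PySem.List.pyRange k (n - 1) 1 = [] := PySem.List.pyRange_one_eq_nil (by omega)
      have hr2 : ts.drop (k + 1).toNat = [] := by
        apply List.drop_eq_nil_of_le
        omega
      simp [hr1, hr2]
  rw [hpart1, hpart2]
  -- stitch: ts = take k ++ ts[k] :: drop (k+1), and ts[k] < t0 is false
  have hklen : k.toNat < ts.length := by omega
  have hsplit : ts = ts.take k.toNat ++ ts[k.toNat] :: ts.drop (k.toNat + 1) := by
    conv_lhs => rw [← List.take_append_drop k.toNat ts]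
    rw [List.drop_eq_getElem_cons hklen]
  have hkk : ts[k.toNat] = t0 := (PySem.List.pyGetD_eq_getElem ts 0 h0 h1).symm
  have hfalse : decide (ts[k.toNat] < t0) = false := by rw [hkk]; simp
  conv_rhs => rw [hsplit]
  rw [List.countP_append, List.countP_cons, hfalse]
  have : (k + 1).toNat = k.toNat + 1 := by omega
  rw [this]
  simp

lemma pvA_char (ts : List Int) : calcPlacement ts = ts.map (fun t => pvRank ts t) := by
  rw [pvA_eq_fold]
  have hbound : ∀ p ∈ pvPairs (ts.length : Int),
      0 ≤ p.1 ∧ p.1 < ((List.replicate ts.length (1 : Int)).length : Int) ∧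
      0 ≤ p.2 ∧ p.2 < ((List.replicate ts.length (1 : Int)).length : Int) := by
    intro p hp
    have := pvPairs_mem (ts.length : Int) p hp
    simp only [List.length_replicate]
    omega
  obtain ⟨hlen, hget⟩ := pvFold_getD ts (pvPairs (ts.length : Int)) _ hbound
  apply List.ext_getElem
  · simp [hlen]
  · intro m h1 h2
    have hm : m < ts.length := by simpa [hlen] using h1
    rw [List.getElem_map]
    have hgm := hget (m : Int) (by omega)
    have hcnt := pvCount ts (m : Int) (by omega) (by omega)
    rw [hcnt] at hgm
    have hl : ((pvPairs (ts.length : Int)).foldl (pvStepA ts)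
        (List.replicate ts.length (1 : Int)))[m] =
        PySem.List.pyGetD ((pvPairs (ts.length : Int)).foldl (pvStepA ts)
          (List.replicate ts.length (1 : Int))) (m : Int) 0 := by
      rw [PySem.List.pyGetD_eq_getElem _ 0 (by omega) (by omega)]
      simp
    rw [hl, hgm]
    have hr : PySem.List.pyGetD (List.replicate ts.length (1 : Int)) (m : Int) 0 = 1 := by
      rw [PySem.List.pyGetD_eq_getElem _ 0 (by omega) (by simp; omega)]
      simp
    have hts : PySem.List.pyGetD ts (m : Int) 0 = ts[m] := by
      rw [PySem.List.pyGetD_eq_getElem ts 0 (by omega) (by omega)]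
      simp
    rw [hr, hts]
    unfold pvRank
    omega

-- ---- B side ----

def pvStepD (d : PySem.Dict Int Int) (p : Int × Int) : PySem.Dict Int Int :=
  if d.contains p.2 then d else d.insert p.2 (p.1 + 1)

lemma pvBuild_get? (s : List Int) (i : Int) (d : PySem.Dict Int Int) (t : Int) :
    ((PySem.List.enumerate s i).foldl pvStepD d).get? t =
      if d.contains t then d.get? t
      else if t ∈ s then some (i + (s.idxOf t : Int) + 1) else none := by
  induction s generalizing i d with
  | nil =>
    simp only [PySem.List.enumerate_nil, List.foldl_nil, List.not_mem_nil, if_false]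
    by_cases h : d.contains t
    · simp [h]
    · simp [h, (PySem.Dict.get?_eq_none_iff_contains d t).mpr (by simp [h])]
  | cons x s ih =>
    rw [PySem.List.enumerate_cons, List.foldl_cons, ih]
    by_cases hx : d.contains x
    · have hd1 : pvStepD d (i, x) = d := by simp [pvStepD, hx]
      rw [hd1]
      by_cases ht : d.contains t
      · simp [ht]
      · have htx : t ≠ x := fun h => ht (h ▸ hx)
        rw [List.idxOf_cons_ne s htx.symm]
        by_cases hts : t ∈ s
        · simp [ht, hts, htx]; ring
        · simp [ht, hts, htx]
    · have hd1 : pvStepD d (i, x) = d.insert x (i + 1) := by simp [pvStepD, hx]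
      rw [hd1]
      by_cases htx : t = x
      · subst htx
        simp [PySem.Dict.contains_insert, PySem.Dict.get?_insert, hx, List.idxOf_cons_self]
      · have hc : (d.insert x (i + 1)).contains t = d.contains t := by
          simp [PySem.Dict.contains_insert, htx]
        rw [hc]
        by_cases ht : d.contains t
        · simp [ht, PySem.Dict.get?_insert, htx]
        · rw [List.idxOf_cons_ne s (fun h => htx h.symm)]
          by_cases hts : t ∈ s
          · simp [ht, hts, htx]; ring
          · simp [ht, hts, htx]

lemma pvIdxOf_sorted (s : List Int) (hs : s.Pairwise (· ≤ ·)) (t : Int) (ht : t ∈ s) :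
    s.idxOf t = s.countP (fun x => decide (x < t)) := by
  induction s with
  | nil => simp at ht
  | cons x s ih =>
    rw [List.pairwise_cons] at hs
    by_cases htx : t = x
    · subst htx
      rw [List.idxOf_cons_self, List.countP_cons]
      have h0 : s.countP (fun x => decide (x < t)) = 0 := by
        rw [List.countP_eq_zero]
        intro a ha
        have := hs.1 a ha
        simp; omega
      simp [h0]
    · have hts : t ∈ s := by
        rcases List.mem_cons.mp ht with h | h
        · exact absurd h htx
        · exact h
      have hxt : x < t := lt_of_le_of_ne (hs.1 t hts) (fun h => htx h.symm)
      rw [List.idxOf_cons_ne s (fun h => htx h.symm), List.countP_cons, ih hs.2 hts]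
      simp [hxt]

lemma pvB_char (ts : List Int) : calcPlacement_alt ts = ts.map (fun t => pvRank ts t) := by
  unfold calcPlacement_alt
  have hfun : (fun (d : PySem.Dict Int Int) (p : Int × Int) =>
      if d.contains p.2 then d else d.insert p.2 (p.1 + 1)) = pvStepD := rfl
  rw [hfun]
  apply List.map_congr_left
  intro t ht
  set s := PySem.List.sorted ts (fun x => x) false with hsdef
  have hmem : t ∈ s := (PySem.List.mem_sorted ts (fun x => x) false t).mpr ht
  rw [pvBuild_get? s 0 PySem.Dict.empty t]
  simp only [PySem.Dict.contains_empty, if_false, hmem, if_true, Bool.false_eq_true]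
  have hidx := pvIdxOf_sorted s (PySem.List.sorted_pairwise ts (fun x => x)) t hmem
  have hperm : s.countP (fun x => decide (x < t)) = ts.countP (fun x => decide (x < t)) :=
    (PySem.List.sorted_perm ts (fun x => x) false).countP_eq _
  unfold pvRank
  simp
  omega

-- ===== VERDICT (by name: the statement is the Claim_ definition above) =====
theorem calcPlacement_spec : Claim_equal_calcPlacement := by
  intro times _
  unfold Spec_calcPlacement
  rw [pvA_char, pvB_char]
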